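-- pv_equiv track=rewrite | github.com/deeryang/python-homework | chap06/chap06_22.py | getTotalDaysInYears
-- ===== SOURCE A (Python) =====
-- def isLeapYear(year):
--     return year % 400 == 0 or (year % 4 == 0 and year % 100 != 0)
--
-- def getTotalDaysInYears(year):
--     total = 0
--     for i in range(1970, year + 1):
--         if isLeapYear(i):
--             total += 366
--         else:
--             total += 365
--
--     return total
-- ===== SOURCE B (Python) =====
-- def getTotalDaysInYears(year):
--     # Closed form: 365 days per year plus one per leap year in 1970..year,
--     # counted by inclusion-exclusion with floor divisions.
--     if year < 1970:
--         return 0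
--     leaps = lambda y: y // 4 - y // 100 + y // 400
--     return 365 * (year - 1969) + leaps(year) - leaps(1969)
-- ===== Notes on version B (the rewrite author's own statement) =====
-- stated objective: faster
-- what changed: Replaced the per-year accumulation loop with a closed form: a constant day count per year plus a leap-year count obtained by inclusion-exclusion over the Gregorian floor divisions.
import Mathlib
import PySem

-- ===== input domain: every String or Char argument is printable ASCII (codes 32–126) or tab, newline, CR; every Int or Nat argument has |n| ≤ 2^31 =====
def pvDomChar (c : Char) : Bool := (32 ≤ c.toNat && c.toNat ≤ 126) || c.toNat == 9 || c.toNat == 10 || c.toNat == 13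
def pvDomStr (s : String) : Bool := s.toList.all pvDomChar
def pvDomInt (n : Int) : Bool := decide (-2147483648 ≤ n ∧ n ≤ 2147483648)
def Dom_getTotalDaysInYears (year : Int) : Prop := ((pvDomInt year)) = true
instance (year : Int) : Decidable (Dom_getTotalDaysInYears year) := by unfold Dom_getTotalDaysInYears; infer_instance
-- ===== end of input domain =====

-- B replaces A's O(year) loop over 1970..year by an O(1) closed form counting
-- leap years with floor-division inclusion-exclusion (objective: faster).

-- ===== PORT A =====
def isLeapYearA (year : Int) : Bool :=
  PySem.Int.mod year 400 == 0 || (PySem.Int.mod year 4 == 0 && PySem.Int.mod year 100 != 0)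

def getTotalDaysInYears (year : Int) : Int :=
  (PySem.List.pyRange 1970 (year + 1) 1).foldl
    (fun total i => if isLeapYearA i then total + 366 else total + 365) 0

-- ===== PORT B =====
def leapsB (y : Int) : Int :=
  PySem.Int.floordiv y 4 - PySem.Int.floordiv y 100 + PySem.Int.floordiv y 400

def getTotalDaysInYears_alt (year : Int) : Int :=
  if year < 1970 then 0
  else 365 * (year - 1969) + leapsB year - leapsB 1969

-- ===== PRECONDITION & SPEC =====
def Spec_getTotalDaysInYears (year : Int) (out : Int) : Prop := out = getTotalDaysInYears_alt year
instance (year : Int) (out : Int) : Decidable (Spec_getTotalDaysInYears year out) := by unfold Spec_getTotalDaysInYears; infer_instance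

-- ===== CLAIM (what is proved, stated in full; the proofs are below) =====
def Claim_equal_getTotalDaysInYears : Prop := ∀ (year : Int), Dom_getTotalDaysInYears year → Spec_getTotalDaysInYears year (getTotalDaysInYears year)

-- ===== LEMMAS AND PROOFS =====

lemma leap_step (z : Int) : leapsB z - leapsB (z - 1) = (if isLeapYearA z then 1 else 0) := by
  simp only [leapsB, isLeapYearA,
    PySem.Int.floordiv_eq_ediv_of_pos (b := 4) (by norm_num),
    PySem.Int.floordiv_eq_ediv_of_pos (b := 100) (by norm_num),
    PySem.Int.floordiv_eq_ediv_of_pos (b := 400) (by norm_num),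
    PySem.Int.mod_eq_emod_of_pos (b := 4) (by norm_num),
    PySem.Int.mod_eq_emod_of_pos (b := 100) (by norm_num),
    PySem.Int.mod_eq_emod_of_pos (b := 400) (by norm_num)]
  split_ifs with h <;>
    simp only [Bool.or_eq_true, Bool.and_eq_true, beq_iff_eq, bne_iff_ne, ne_eq] at h <;>
    omega

lemma loop_closed (y : Int) (h : 1969 ≤ y) :
    getTotalDaysInYears y = 365 * (y - 1969) + leapsB y - leapsB 1969 := by
  induction y, h using Int.le_induction with
  | base =>
      unfold getTotalDaysInYears
      rw [show (1969 : Int) + 1 = 1970 from rfl,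
        PySem.List.pyRange_one_eq_nil (le_refl (1970 : Int))]
      simp
  | succ y hy ih =>
      unfold getTotalDaysInYears at ih ⊢
      rw [PySem.List.pyRange_one_succ_right (by omega : (1970 : Int) ≤ y + 1),
        List.foldl_append]
      simp only [List.foldl]
      have hs := leap_step (y + 1)
      simp only [add_sub_cancel_right] at hs
      rw [ih]
      split_ifs at hs ⊢ <;> linarith

-- ===== VERDICT (by name: the statement is the Claim_ definition above) =====
theorem getTotalDaysInYears_spec : Claim_equal_getTotalDaysInYears := by
  intro year _
  unfold Spec_getTotalDaysInYears getTotalDaysInYears_alt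
  split_ifs with h
  · unfold getTotalDaysInYears
    rw [PySem.List.pyRange_one_eq_nil (by omega : year + 1 ≤ (1970 : Int))]
    rfl
  · exact loop_closed year (by omega)
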